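-- pv_equiv track=rewrite | github.com/inode64/livecheck | livecheck/special/utils.py | get_archive_extension
-- ===== SOURCE A (Python) =====
-- def get_archive_extension(filename: str) -> str:
--     filename = filename.lower()
--     for ext in [
--             'tar.gz', 'tar.xz', 'tar.bz2', 'tar.lz', 'tar.zst', 'tc.gz', 'tar.z', 'gz', 'xz', 'zip',
--             'tbz2', 'bz2', 'tbz', 'txz', 'tar', 'tgz', 'rar', '7z'
--     ]:
--         if filename.endswith('.' + ext):
--             return '.' + ext
--
--     return ''
-- ===== SOURCE B (Python) =====
-- COMPOUND_EXTS = {'tar.gz', 'tar.xz', 'tar.bz2', 'tar.lz', 'tar.zst', 'tc.gz', 'tar.z'}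
-- SINGLE_EXTS = {'gz', 'xz', 'zip', 'tbz2', 'bz2', 'tbz', 'txz', 'tar', 'tgz', 'rar', '7z'}
--
--
-- def get_archive_extension(filename: str) -> str:
--     parts = filename.lower().split('.')
--     last2 = '.'.join(parts[-2:])
--     if len(parts) >= 3 and last2 in COMPOUND_EXTS:
--         return '.' + last2
--     if len(parts) >= 2 and parts[-1] in SINGLE_EXTS:
--         return '.' + parts[-1]
--     return ''
-- ===== Notes on version B (the rewrite author's own statement) =====
-- stated objective: idiomatic
-- what changed: Replaces the ordered 18-pattern endswith scan by one split of the lowercased name at dot separators plus two set lookups (the last two segments joined against the compound-extension set, then the last segment against the single-extension set), with length guards reproducing the required leading dot.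
import Mathlib
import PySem

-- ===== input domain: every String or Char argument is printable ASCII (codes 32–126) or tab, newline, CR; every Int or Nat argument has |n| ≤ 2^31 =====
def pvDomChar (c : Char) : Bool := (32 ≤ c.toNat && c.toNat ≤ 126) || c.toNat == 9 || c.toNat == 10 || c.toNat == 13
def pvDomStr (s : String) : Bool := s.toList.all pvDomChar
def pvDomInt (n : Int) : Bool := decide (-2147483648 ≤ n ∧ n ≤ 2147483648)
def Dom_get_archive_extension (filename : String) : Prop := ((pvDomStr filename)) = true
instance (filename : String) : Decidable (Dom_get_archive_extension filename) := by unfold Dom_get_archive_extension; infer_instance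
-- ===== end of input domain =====

-- B replaces A's ordered 18-pattern endswith scan by one split on '.' plus two set lookups (idiomatic; same results).
-- String operations are ported exactly on char lists via PySem.Chars (PySem.Str.f s is PySem.Chars.f s.toList);
-- Python's '.' + ext string concatenation is '.' :: ext on char lists.

-- ===== PORT A =====
-- the literal list of extensions from A's for loop, in A's order
def pvExtsA : List (List Char) :=
  ["tar.gz".toList, "tar.xz".toList, "tar.bz2".toList, "tar.lz".toList, "tar.zst".toList,
   "tc.gz".toList, "tar.z".toList, "gz".toList, "xz".toList, "zip".toList, "tbz2".toList,
   "bz2".toList, "tbz".toList, "txz".toList, "tar".toList, "tgz".toList, "rar".toList, "7z".toList]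

-- A's for loop with early return
def pvLoopA (name : List Char) : List (List Char) → String
  | [] => ""
  | ext :: rest =>
      if PySem.Chars.endswith name ('.' :: ext) then String.ofList ('.' :: ext)
      else pvLoopA name rest

def get_archive_extension (filename : String) : String :=
  pvLoopA (PySem.Chars.lower filename.toList) pvExtsA

-- ===== PORT B =====
-- Source B's two set literals
def pvCompoundExts : PySem.Set (List Char) :=
  PySem.Set.ofList ["tar.gz".toList, "tar.xz".toList, "tar.bz2".toList, "tar.lz".toList,
                    "tar.zst".toList, "tc.gz".toList, "tar.z".toList]
def pvSingleExts : PySem.Set (List Char) :=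
  PySem.Set.ofList ["gz".toList, "xz".toList, "zip".toList, "tbz2".toList, "bz2".toList,
                    "tbz".toList, "txz".toList, "tar".toList, "tgz".toList, "rar".toList, "7z".toList]

def get_archive_extension_alt (filename : String) : String :=
  let parts := PySem.Chars.splitOn (PySem.Chars.lower filename.toList) ['.']
  let last2 := PySem.Chars.join ['.'] (PySem.List.slice parts (some (-2)) none)
  if 3 ≤ parts.length ∧ PySem.Set.contains pvCompoundExts last2 = true then
    String.ofList ('.' :: last2)
  else if 2 ≤ parts.length ∧ PySem.Set.contains pvSingleExts (PySem.List.pyGetD parts (-1) []) = true then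
    -- parts[-1]: the 2 ≤ len(parts) guard makes the index in range, so the default is unreachable
    String.ofList ('.' :: PySem.List.pyGetD parts (-1) [])
  else ""

-- ===== PRECONDITION & SPEC =====
def Spec_get_archive_extension (filename : String) (out : String) : Prop := out = get_archive_extension_alt filename
instance (filename : String) (out : String) : Decidable (Spec_get_archive_extension filename out) := by unfold Spec_get_archive_extension; infer_instance

-- ===== CLAIM (what is proved, stated in full; the proofs are below) =====
def Claim_equal_get_archive_extension : Prop := ∀ (filename : String), Dom_get_archive_extension filename → Spec_get_archive_extension filename (get_archive_extension filename)

-- ===== LEMMAS AND PROOFS =====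

-- reference single-character split (structural recursion), proved equal to PySem.Chars.splitOn below
def pvSS (c : Char) : List Char → List (List Char)
  | [] => [[]]
  | a :: rest => if a = c then [] :: pvSS c rest else (pvSS c rest).modifyHead (a :: ·)

def pvJoin (c : Char) : List (List Char) → List Char
  | [] => []
  | [s] => s
  | s :: rest => s ++ c :: pvJoin c rest

lemma pvSS_ne_nil (c : Char) (l : List Char) : pvSS c l ≠ [] := by
  induction l with
  | nil => simp [pvSS]
  | cons a rest ih =>
    simp only [pvSS]
    split
    · simp
    · rcases List.exists_cons_of_ne_nil ih with ⟨s, ss, hs⟩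
      simp [hs]

lemma pvGo_spec (c : Char) (fuel : Nat) (l cur : List Char) (acc : List (List Char))
    (h : l.length ≤ fuel) :
    PySem.Chars.splitOn.go [c] fuel l cur acc = acc.reverse ++ (pvSS c l).modifyHead (cur.reverse ++ ·) := by
  induction fuel generalizing l cur acc with
  | zero =>
    have : l = [] := by cases l <;> simp_all
    subst this
    simp [PySem.Chars.splitOn.go, pvSS]
  | succ fuel ih =>
    cases l with
    | nil => simp [PySem.Chars.splitOn.go, pvSS]
    | cons a rest =>
      rw [PySem.Chars.splitOn.go]
      by_cases hac : a = c
      · have hpre : [c].isPrefixOf (a :: rest) = true := by simp [List.isPrefixOf, hac]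
        simp only [hpre, if_pos, List.length_cons, List.length_nil, List.drop_succ_cons, List.drop_zero]
        rw [ih rest [] (cur.reverse :: acc) (by simpa using Nat.le_of_succ_le_succ h)]
        rcases List.exists_cons_of_ne_nil (pvSS_ne_nil c rest) with ⟨s, ss, hs⟩
        simp [pvSS, hs, hac]
      · have hpre : [c].isPrefixOf (a :: rest) = false := by
          simp [List.isPrefixOf]; exact fun hc => absurd hc.symm hac
        simp only [hpre]
        rw [if_neg (by simp)]
        rw [ih rest (a :: cur) acc (by simpa using Nat.le_of_succ_le_succ h)]
        rcases List.exists_cons_of_ne_nil (pvSS_ne_nil c rest) with ⟨s, ss, hs⟩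
        simp [pvSS, hs, hac]

lemma pvSplitOn_eq (c : Char) (l : List Char) : PySem.Chars.splitOn l [c] = pvSS c l := by
  rw [PySem.Chars.splitOn, pvGo_spec c (l.length + 1) l [] [] (by omega)]
  rcases List.exists_cons_of_ne_nil (pvSS_ne_nil c l) with ⟨s, ss, hs⟩
  simp [hs]

lemma pvSS_no_sep (c : Char) (l : List Char) (h : c ∉ l) : pvSS c l = [l] := by
  induction l with
  | nil => simp [pvSS]
  | cons a rest ih =>
    simp only [List.mem_cons, not_or] at h
    simp [pvSS, Ne.symm h.1, ih h.2]

lemma pvSS_append (c : Char) (a b : List Char) : pvSS c (a ++ c :: b) = pvSS c a ++ pvSS c b := by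
  induction a with
  | nil => simp [pvSS]
  | cons x a' ih =>
    simp only [List.cons_append, pvSS, ih]
    split
    · simp
    · rcases List.exists_cons_of_ne_nil (pvSS_ne_nil c a') with ⟨s, ss, hs⟩
      simp [hs]

lemma pvSS_sep_free (c : Char) (l : List Char) : ∀ s ∈ pvSS c l, c ∉ s := by
  induction l with
  | nil => simp [pvSS]
  | cons a rest ih =>
    simp only [pvSS]
    split
    · intro s hs
      rcases List.mem_cons.mp hs with h | h
      · simp [h]
      · exact ih s h
    · rcases List.exists_cons_of_ne_nil (pvSS_ne_nil c rest) with ⟨s0, ss, hs⟩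
      rename_i hac
      intro s hs'
      rw [hs] at hs'
      simp only [List.modifyHead_cons, List.mem_cons] at hs'
      rcases hs' with h | h
      · subst h
        intro hmem
        rcases List.mem_cons.mp hmem with h | h
        · exact hac h.symm
        · exact ih s0 (by simp [hs]) h
      · exact ih s (by simp [hs, h])

lemma pvSS_singleton_not_mem (c : Char) (l : List Char) (z : List Char)
    (h : pvSS c l = [z]) : c ∉ l := by
  induction l generalizing z with
  | nil => simp
  | cons a rest ih =>
    simp only [pvSS] at h
    rcases List.exists_cons_of_ne_nil (pvSS_ne_nil c rest) with ⟨s, ss, hs⟩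
    by_cases hac : a = c
    · rw [if_pos hac, hs] at h
      simp at h
    · rw [if_neg hac, hs] at h
      simp only [List.modifyHead_cons] at h
      simp only [List.cons.injEq] at h
      obtain ⟨h1, h2⟩ := h
      have hrest : c ∉ rest := ih s (by rw [hs, h2])
      intro hmem
      rcases List.mem_cons.mp hmem with hh | hh
      · exact hac hh.symm
      · exact hrest hh

lemma pvJoin_pvSS (c : Char) (l : List Char) : pvJoin c (pvSS c l) = l := by
  induction l with
  | nil => simp [pvSS, pvJoin]
  | cons a rest ih =>
    rcases List.exists_cons_of_ne_nil (pvSS_ne_nil c rest) with ⟨s, ss, hs⟩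
    by_cases hac : a = c
    · subst hac
      rw [pvSS, if_pos rfl, hs]
      rw [hs] at ih
      cases ss with
      | nil =>
        simp only [pvJoin] at ih ⊢
        simp [ih]
      | cons t ts =>
        simp only [pvJoin] at ih ⊢
        simp [ih]
    · rw [pvSS, if_neg hac, hs]
      rw [hs] at ih
      cases ss with
      | nil =>
        simp only [List.modifyHead_cons, pvJoin] at ih ⊢
        simp [ih]
      | cons t ts =>
        simp only [List.modifyHead_cons, pvJoin] at ih ⊢
        simp [ih]

lemma pvJoin_concat (c : Char) (ys : List (List Char)) (w : List Char) (h : ys ≠ []) :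
    pvJoin c (ys ++ [w]) = pvJoin c ys ++ c :: w := by
  induction ys with
  | nil => simp at h
  | cons y ys' ih =>
    cases ys' with
    | nil => simp [pvJoin]
    | cons t ts =>
      have hne : t :: ts ≠ [] := by simp
      simp only [List.cons_append, pvJoin]
      rw [show t :: (ts ++ [w]) = (t :: ts) ++ [w] from rfl, ih hne]
      cases ts <;> simp [pvJoin]

lemma pvSuffix_single (c : Char) (l w : List Char) (hw : c ∉ w) :
    (c :: w) <:+ l ↔ 2 ≤ (pvSS c l).length ∧ (pvSS c l).getLast? = some w := by
  constructor
  · rintro ⟨a, rfl⟩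
    rw [pvSS_append c a w, pvSS_no_sep c w hw]
    have := pvSS_ne_nil c a
    constructor
    · have : 1 ≤ (pvSS c a).length := List.length_pos_iff.mpr this
      simp; omega
    · simp
  · rintro ⟨hlen, hlast⟩
    rcases List.getLast?_eq_some_iff.mp hlast with ⟨qs, hqs⟩
    have hqs_ne : qs ≠ [] := by
      rintro rfl; rw [hqs] at hlen; simp at hlen
    refine ⟨pvJoin c qs, ?_⟩
    have := pvJoin_pvSS c l
    rw [hqs, pvJoin_concat c qs w hqs_ne] at this
    exact this

lemma pvSuffix_pair (c : Char) (l e1 e2 : List Char) (h1 : c ∉ e1) (h2 : c ∉ e2) :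
    (c :: (e1 ++ c :: e2)) <:+ l ↔
      3 ≤ (pvSS c l).length ∧ (pvSS c l).getLast? = some e2 ∧
        (pvSS c l).dropLast.getLast? = some e1 := by
  constructor
  · rintro ⟨a, rfl⟩
    have : a ++ c :: (e1 ++ c :: e2) = (a ++ c :: e1) ++ c :: e2 := by simp
    rw [this, pvSS_append c (a ++ c :: e1) e2, pvSS_append c a e1,
      pvSS_no_sep c e1 h1, pvSS_no_sep c e2 h2]
    have hne := pvSS_ne_nil c a
    have hlen : 1 ≤ (pvSS c a).length := List.length_pos_iff.mpr hne
    refine ⟨by simp; omega, by simp, ?_⟩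
    have : (pvSS c a ++ [e1]) ++ [e2] = pvSS c a ++ [e1] ++ [e2] := by simp
    rw [show pvSS c a ++ [e1] ++ [e2] = (pvSS c a ++ [e1]) ++ [e2] from by simp,
      List.dropLast_concat]
    simp
  · rintro ⟨hlen, hlast, hprev⟩
    rcases List.getLast?_eq_some_iff.mp hlast with ⟨qs, hqs⟩
    rw [hqs, List.dropLast_concat] at hprev
    rcases List.getLast?_eq_some_iff.mp hprev with ⟨rs, hrs⟩
    have hrs_ne : rs ≠ [] := by
      rintro rfl
      rw [hqs, hrs] at hlen; simp at hlen
    refine ⟨pvJoin c rs, ?_⟩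
    have hj := pvJoin_pvSS c l
    rw [hqs, hrs] at hj
    rw [pvJoin_concat c (rs ++ [e1]) e2 (by simp), pvJoin_concat c rs e1 hrs_ne] at hj
    simpa using hj

lemma pvACI_aux (c : Char) (a : List Char) :
    ∀ (x b d : List Char), c ∉ a → c ∉ x → a ++ c :: b = x ++ c :: d → a = x ∧ b = d := by
  induction a with
  | nil =>
    intro x b d _ hx h
    cases x with
    | nil => simpa using h
    | cons u x' =>
      simp only [List.nil_append, List.cons_append, List.cons.injEq] at h
      simp only [List.mem_cons, not_or] at hx
      exact absurd h.1 hx.1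
  | cons u a' ih =>
    intro x b d ha hx h
    cases x with
    | nil =>
      simp only [List.cons_append, List.nil_append, List.cons.injEq] at h
      simp only [List.mem_cons, not_or] at ha
      exact absurd h.1.symm ha.1
    | cons v x' =>
      simp only [List.cons_append, List.cons.injEq] at h
      obtain ⟨rfl, h2⟩ := h
      simp only [List.mem_cons, not_or] at ha hx
      obtain ⟨h3, h4⟩ := ih x' b d ha.2 hx.2 h2
      simp [h3, h4]

lemma pvAppend_cons_inj (c : Char) (a b x d : List Char) (ha : c ∉ a) (hx : c ∉ x) :
    a ++ c :: b = x ++ c :: d ↔ a = x ∧ b = d := by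
  constructor
  · exact fun h => pvACI_aux c a x b d ha hx h
  · rintro ⟨rfl, rfl⟩; rfl

lemma pvCondNil (l z : List Char) (h : pvSS '.' l = [z]) (w : List Char) :
    PySem.Chars.endswith l ('.' :: w) = false := by
  have hnm := pvSS_singleton_not_mem '.' l z h
  rw [← Bool.not_eq_true, PySem.Chars.endswith_iff]
  intro hsuf
  exact hnm (hsuf.subset (List.mem_cons_self))

lemma pvCondS (l : List Char) (ys' : List (List Char)) (y z : List Char)
    (h : pvSS '.' l = ys' ++ [y, z]) (w : List Char) (hw : '.' ∉ w) :
    (PySem.Chars.endswith l ('.' :: w) = true) ↔ z = w := by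
  rw [PySem.Chars.endswith_iff, pvSuffix_single '.' l w hw, h]
  have h1 : (ys' ++ [y, z]).getLast? = some z := by
    rw [show ys' ++ [y, z] = (ys' ++ [y]) ++ [z] from by simp]
    exact List.getLast?_concat
  rw [h1]
  simp only [List.length_append, List.length_cons, List.length_nil, Option.some.injEq]
  constructor
  · exact fun hh => hh.2
  · exact fun hh => ⟨by omega, hh⟩

lemma pvCondC (l : List Char) (ys' : List (List Char)) (y z : List Char)
    (h : pvSS '.' l = ys' ++ [y, z]) (p e1 e2 : List Char) (hp : p = e1 ++ '.' :: e2)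
    (h1 : '.' ∉ e1) (h2 : '.' ∉ e2) :
    (PySem.Chars.endswith l ('.' :: p) = true) ↔ (ys' ≠ [] ∧ y = e1 ∧ z = e2) := by
  rw [PySem.Chars.endswith_iff, hp, pvSuffix_pair '.' l e1 e2 h1 h2, h]
  have hz : (ys' ++ [y, z]).getLast? = some z := by
    rw [show ys' ++ [y, z] = (ys' ++ [y]) ++ [z] from by simp]
    exact List.getLast?_concat
  have hdl : (ys' ++ [y, z]).dropLast = ys' ++ [y] := by
    rw [show ys' ++ [y, z] = (ys' ++ [y]) ++ [z] from by simp]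
    exact List.dropLast_concat
  have hy : (ys' ++ [y, z]).dropLast.getLast? = some y := by
    rw [hdl]; exact List.getLast?_concat
  rw [hz, hy]
  simp only [List.length_append, List.length_cons, List.length_nil, Option.some.injEq]
  constructor
  · rintro ⟨ha, hb, hc⟩
    refine ⟨?_, hc, hb⟩
    intro hnil; rw [hnil] at ha; simp at ha
  · rintro ⟨ha, hb, hc⟩
    have : 1 ≤ ys'.length := List.length_pos_iff.mpr ha
    exact ⟨by omega, hc, hb⟩

lemma pvSlice2 (qs : List (List Char)) (y z : List Char) :
    PySem.List.slice (qs ++ [y, z]) (some (-2)) none = [y, z] := by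
  have hlen : (qs ++ [y, z]).length = qs.length + 2 := by simp
  simp only [PySem.List.slice, PySem.List.clampIdx, hlen]
  rw [if_pos (by omega : (-2 : Int) < 0)]
  rw [if_neg (by push_cast; omega : ¬((((qs.length + 2 : Nat) : Int)) + (-2) < 0))]
  rw [show (((qs.length + 2 : Nat) : Int) + (-2)).toNat = qs.length from by push_cast; omega]
  rw [show qs.length + 2 - qs.length = 2 from by omega]
  rw [List.drop_append_of_le_length (by omega)]
  simp

lemma pvGetNeg1 (qs : List (List Char)) (z : List Char) :
    PySem.List.pyGetD (qs ++ [z]) (-1) [] = z := by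
  have hlen : (qs ++ [z]).length = qs.length + 1 := by simp
  simp only [PySem.List.pyGetD, PySem.List.pyGet?, PySem.List.pyIdx?, hlen]
  rw [if_neg (by omega : ¬((0 : Int) ≤ -1))]
  rw [if_pos (by push_cast; omega : -(((qs.length + 1 : Nat) : Int)) ≤ -1)]
  simp only [Option.getD, Option.bind]
  rw [show qs.length + 1 - (-(-1 : Int)).toNat = qs.length from by omega]
  rw [List.getElem?_append_right (by omega)]
  simp

-- ===== VERDICT (by name: the statement is the Claim_ definition above) =====
set_option maxHeartbeats 1000000 in
theorem get_archive_extension_spec : Claim_equal_get_archive_extension := by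
  intro f _
  unfold Spec_get_archive_extension get_archive_extension get_archive_extension_alt
  set l := PySem.Chars.lower f.toList with hl
  rcases List.eq_nil_or_concat (pvSS '.' l) with hnil | ⟨qs, z, hqz⟩
  · exact absurd hnil (pvSS_ne_nil '.' l)
  rw [List.concat_eq_append] at hqz
  rcases List.eq_nil_or_concat qs with rfl | ⟨ys', y, rfl⟩
  · -- one segment: the name contains no '.', both sides return ''
    simp only [List.nil_append] at hqz
    have hA := pvCondNil l z hqz
    have hsplit := pvSplitOn_eq '.' l
    rw [hqz] at hsplit
    simp only [hsplit]
    rw [if_neg (by rintro ⟨h3, -⟩; simp at h3)]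
    rw [if_neg (by rintro ⟨h2, -⟩; simp at h2)]
    simp only [pvLoopA, pvExtsA, hA, Bool.false_eq_true, if_false]
  · rw [List.concat_eq_append, List.append_assoc] at hqz
    have h : pvSS '.' l = ys' ++ [y, z] := by simpa using hqz
    have hy : '.' ∉ y := pvSS_sep_free '.' l y (by rw [h]; simp)
    have hz : '.' ∉ z := pvSS_sep_free '.' l z (by rw [h]; simp)
    have hsplit := pvSplitOn_eq '.' l
    rw [h] at hsplit
    have E1 := pvCondC l ys' y z h "tar.gz".toList "tar".toList "gz".toList (by decide) (by decide) (by decide)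
    have E2 := pvCondC l ys' y z h "tar.xz".toList "tar".toList "xz".toList (by decide) (by decide) (by decide)
    have E3 := pvCondC l ys' y z h "tar.bz2".toList "tar".toList "bz2".toList (by decide) (by decide) (by decide)
    have E4 := pvCondC l ys' y z h "tar.lz".toList "tar".toList "lz".toList (by decide) (by decide) (by decide)
    have E5 := pvCondC l ys' y z h "tar.zst".toList "tar".toList "zst".toList (by decide) (by decide) (by decide)
    have E6 := pvCondC l ys' y z h "tc.gz".toList "tc".toList "gz".toList (by decide) (by decide) (by decide)
    have E7 := pvCondC l ys' y z h "tar.z".toList "tar".toList "z".toList (by decide) (by decide) (by decide)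
    have S1 := pvCondS l ys' y z h "gz".toList (by decide)
    have S2 := pvCondS l ys' y z h "xz".toList (by decide)
    have S3 := pvCondS l ys' y z h "zip".toList (by decide)
    have S4 := pvCondS l ys' y z h "tbz2".toList (by decide)
    have S5 := pvCondS l ys' y z h "bz2".toList (by decide)
    have S6 := pvCondS l ys' y z h "tbz".toList (by decide)
    have S7 := pvCondS l ys' y z h "txz".toList (by decide)
    have S8 := pvCondS l ys' y z h "tar".toList (by decide)
    have S9 := pvCondS l ys' y z h "tgz".toList (by decide)
    have S10 := pvCondS l ys' y z h "rar".toList (by decide)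
    have S11 := pvCondS l ys' y z h "7z".toList (by decide)
    have hB1 : PySem.List.slice (ys' ++ [y, z]) (some (-2)) none = [y, z] := pvSlice2 ys' y z
    have hjoin : PySem.Chars.join ['.'] [y, z] = y ++ '.' :: z := by
      rw [PySem.Chars.join_cons_cons, PySem.Chars.join_singleton]; simp
    have hlast : PySem.List.pyGetD (ys' ++ [y, z]) (-1) [] = z := by
      rw [show ys' ++ [y, z] = (ys' ++ [y]) ++ [z] from by simp]
      exact pvGetNeg1 (ys' ++ [y]) z
    have hlen : (ys' ++ [y, z]).length = ys'.length + 2 := by simp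
    have M1 : (y ++ '.' :: z = "tar.gz".toList) ↔ (y = "tar".toList ∧ z = "gz".toList) := by
      rw [show "tar.gz".toList = "tar".toList ++ '.' :: "gz".toList from by decide]
      exact pvAppend_cons_inj '.' y z _ _ hy (by decide)
    have M2 : (y ++ '.' :: z = "tar.xz".toList) ↔ (y = "tar".toList ∧ z = "xz".toList) := by
      rw [show "tar.xz".toList = "tar".toList ++ '.' :: "xz".toList from by decide]
      exact pvAppend_cons_inj '.' y z _ _ hy (by decide)
    have M3 : (y ++ '.' :: z = "tar.bz2".toList) ↔ (y = "tar".toList ∧ z = "bz2".toList) := by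
      rw [show "tar.bz2".toList = "tar".toList ++ '.' :: "bz2".toList from by decide]
      exact pvAppend_cons_inj '.' y z _ _ hy (by decide)
    have M4 : (y ++ '.' :: z = "tar.lz".toList) ↔ (y = "tar".toList ∧ z = "lz".toList) := by
      rw [show "tar.lz".toList = "tar".toList ++ '.' :: "lz".toList from by decide]
      exact pvAppend_cons_inj '.' y z _ _ hy (by decide)
    have M5 : (y ++ '.' :: z = "tar.zst".toList) ↔ (y = "tar".toList ∧ z = "zst".toList) := by
      rw [show "tar.zst".toList = "tar".toList ++ '.' :: "zst".toList from by decide]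
      exact pvAppend_cons_inj '.' y z _ _ hy (by decide)
    have M6 : (y ++ '.' :: z = "tc.gz".toList) ↔ (y = "tc".toList ∧ z = "gz".toList) := by
      rw [show "tc.gz".toList = "tc".toList ++ '.' :: "gz".toList from by decide]
      exact pvAppend_cons_inj '.' y z _ _ hy (by decide)
    have M7 : (y ++ '.' :: z = "tar.z".toList) ↔ (y = "tar".toList ∧ z = "z".toList) := by
      rw [show "tar.z".toList = "tar".toList ++ '.' :: "z".toList from by decide]
      exact pvAppend_cons_inj '.' y z _ _ hy (by decide)
    simp only [pvLoopA, pvExtsA, hsplit, hB1, hjoin, hlast, hlen,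
      E1, E2, E3, E4, E5, E6, E7, S1, S2, S3, S4, S5, S6, S7, S8, S9, S10, S11,
      pvCompoundExts, pvSingleExts, PySem.Set.contains_iff, PySem.Set.mem_ofList,
      List.mem_cons, List.not_mem_nil, or_false,
      M1, M2, M3, M4, M5, M6, M7]
    have hlen2 : 2 ≤ ys'.length + 2 := by omega
    rcases eq_or_ne ys' [] with rfl | hys
    · have h3 : ¬ (3 ≤ ([] : List (List Char)).length + 2) := by simp
      simp only [ne_eq, not_true_eq_false, false_and, if_false, hlen2, true_and,
        eq_false h3]
      by_cases z1 : z = "gz".toList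
      · subst z1; decide
      by_cases z2 : z = "xz".toList
      · subst z2; decide
      by_cases z3 : z = "zip".toList
      · subst z3; decide
      by_cases z4 : z = "tbz2".toList
      · subst z4; decide
      by_cases z5 : z = "bz2".toList
      · subst z5; decide
      by_cases z6 : z = "tbz".toList
      · subst z6; decide
      by_cases z7 : z = "txz".toList
      · subst z7; decide
      by_cases z8 : z = "tar".toList
      · subst z8; decide
      by_cases z9 : z = "tgz".toList
      · subst z9; decide
      by_cases z10 : z = "rar".toList
      · subst z10; decide
      by_cases z11 : z = "7z".toList
      · subst z11; decide
      simp only [eq_false z1, eq_false z2, eq_false z3, eq_false z4, eq_false z5, eq_false z6,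
        eq_false z7, eq_false z8, eq_false z9, eq_false z10, eq_false z11, or_false, if_false]
    · have h3 : 3 ≤ ys'.length + 2 := by
        have := List.length_pos_iff.mpr hys; omega
      simp only [hys, not_false_eq_true, true_and, h3, hlen2, ne_eq]
      by_cases c1 : y = "tar".toList ∧ z = "gz".toList
      · obtain ⟨rfl, rfl⟩ := c1; decide
      by_cases c2 : y = "tar".toList ∧ z = "xz".toList
      · obtain ⟨rfl, rfl⟩ := c2; decide
      by_cases c3 : y = "tar".toList ∧ z = "bz2".toList
      · obtain ⟨rfl, rfl⟩ := c3; decide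
      by_cases c4 : y = "tar".toList ∧ z = "lz".toList
      · obtain ⟨rfl, rfl⟩ := c4; decide
      by_cases c5 : y = "tar".toList ∧ z = "zst".toList
      · obtain ⟨rfl, rfl⟩ := c5; decide
      by_cases c6 : y = "tc".toList ∧ z = "gz".toList
      · obtain ⟨rfl, rfl⟩ := c6; decide
      by_cases c7 : y = "tar".toList ∧ z = "z".toList
      · obtain ⟨rfl, rfl⟩ := c7; decide
      simp only [eq_false c1, eq_false c2, eq_false c3, eq_false c4, eq_false c5,
        eq_false c6, eq_false c7, or_false, if_false]
      by_cases z1 : z = "gz".toList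
      · subst z1; decide
      by_cases z2 : z = "xz".toList
      · subst z2; decide
      by_cases z3 : z = "zip".toList
      · subst z3; decide
      by_cases z4 : z = "tbz2".toList
      · subst z4; decide
      by_cases z5 : z = "bz2".toList
      · subst z5; decide
      by_cases z6 : z = "tbz".toList
      · subst z6; decide
      by_cases z7 : z = "txz".toList
      · subst z7; decide
      by_cases z8 : z = "tar".toList
      · subst z8; decide
      by_cases z9 : z = "tgz".toList
      · subst z9; decide
      by_cases z10 : z = "rar".toList
      · subst z10; decide
      by_cases z11 : z = "7z".toList
      · subst z11; decide
      simp only [eq_false z1, eq_false z2, eq_false z3, eq_false z4, eq_false z5, eq_false z6,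
        eq_false z7, eq_false z8, eq_false z9, eq_false z10, eq_false z11, or_false, if_false]
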